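-- pv_equiv track=rewrite | github.com/slisznia/drift | lang2/borrow_checker_pass.py | _reachable_backward
-- ===== SOURCE A (Python) =====
-- from typing import Dict, List, Optional, Mapping, Callable, Tuple, Set
-- from collections import deque
--
-- def _reachable_backward(starts: Set[int], preds: Dict[int, List[int]]) -> Set[int]:
-- 	seen: Set[int] = set()
-- 	q: deque[int] = deque(starts)
-- 	while q:
-- 		bid = q.popleft()
-- 		if bid in seen:
-- 			continue
-- 		seen.add(bid)
-- 		for p in preds.get(bid, []):
-- 			if p not in seen:
-- 				q.append(p)
-- 	return seen
-- ===== SOURCE B (Python) =====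
-- from typing import Dict, List, Set
--
--
-- def _reachable_backward(starts: Set[int], preds: Dict[int, List[int]]) -> Set[int]:
-- 	# Fixpoint saturation (naive dataflow iteration): no worklist at all.
-- 	# Repeatedly sweep every known-reachable node, adding its predecessors,
-- 	# until a full sweep adds nothing. Correct because the reachable set is
-- 	# the least fixpoint of  X = starts ∪ preds(X).
-- 	seen: Dict[int, None] = dict.fromkeys(starts)
-- 	changed = True
-- 	while changed:
-- 		changed = False
-- 		for bid in list(seen):
-- 			for p in preds.get(bid, []):
-- 				if p not in seen:
-- 					seen[p] = None
-- 					changed = True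
-- 	return set(seen)
-- ===== Notes on version B (the rewrite author's own statement) =====
-- stated objective: alternative
-- what changed: Replaces the BFS worklist (deque + pop/enqueue) by naive fixpoint saturation: repeatedly sweep every currently-reachable node adding its predecessors until a full sweep adds nothing; there is no queue at all, correctness follows because the reachable set is the least fixpoint of X = starts ∪ preds(X).
import Mathlib
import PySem

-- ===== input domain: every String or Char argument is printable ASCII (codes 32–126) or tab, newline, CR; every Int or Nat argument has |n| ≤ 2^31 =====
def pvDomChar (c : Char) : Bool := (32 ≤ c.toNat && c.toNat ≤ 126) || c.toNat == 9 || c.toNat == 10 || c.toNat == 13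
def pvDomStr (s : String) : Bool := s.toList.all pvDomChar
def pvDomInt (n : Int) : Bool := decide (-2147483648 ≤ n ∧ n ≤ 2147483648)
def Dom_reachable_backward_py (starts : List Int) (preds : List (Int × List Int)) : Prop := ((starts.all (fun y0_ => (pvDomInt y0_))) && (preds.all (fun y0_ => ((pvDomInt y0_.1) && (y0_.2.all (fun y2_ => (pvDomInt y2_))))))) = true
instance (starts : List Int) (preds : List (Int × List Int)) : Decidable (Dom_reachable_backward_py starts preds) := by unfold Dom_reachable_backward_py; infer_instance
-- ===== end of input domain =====

-- B replaces A's deque-based BFS by fixpoint saturation: repeated full sweeps over the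
-- current reachable set until a sweep adds nothing; same reachable set (alternative, not faster).

-- shared primitive: preds.get(k, []) — first-match association-list lookup
def pvGet (preds : List (Int × List Int)) (k : Int) : List Int :=
  match preds.find? (fun kv => kv.1 == k) with
  | some kv => kv.2
  | none => []

-- total size of all predecessor lists (termination weight only)
def pvPSum (preds : List (Int × List Int)) : Nat :=
  preds.foldl (fun a kv => a + kv.2.length) 0

-- finite universe every id ever added belongs to (termination scaffolding only)
def pvUniv (starts : List Int) (preds : List (Int × List Int)) : List Int :=
  starts ++ preds.flatMap (fun kv => kv.2)

-- lemmas port A cites in its decreasing_by proof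
theorem pvPSum_init (preds : List (Int × List Int)) : ∀ n : Nat,
    preds.foldl (fun a kv => a + kv.2.length) n = n + pvPSum preds := by
  induction preds with
  | nil => intro n; simp [pvPSum]
  | cons kv t ih =>
    intro n
    simp only [pvPSum, List.foldl_cons] at *
    rw [ih (n + kv.2.length), ih (0 + kv.2.length)]
    omega

theorem pvGet_len_le (preds : List (Int × List Int)) (k : Int) :
    (pvGet preds k).length ≤ pvPSum preds := by
  induction preds with
  | nil => simp [pvGet, pvPSum]
  | cons kv t ih =>
    have hsum : pvPSum (kv :: t) = kv.2.length + pvPSum t := by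
      simp only [pvPSum, List.foldl_cons]
      simpa using pvPSum_init t kv.2.length
    by_cases h : (kv.1 == k) = true
    · simp [pvGet, h, hsum]
    · simp only [pvGet, List.find?_cons, h] at *
      omega

-- ===== PORT A =====
-- literal port of A's while loop over (seen, queue); the 'bid ∈ univ' test is a
-- termination guard only: every id ever enqueued from the real entry point is in univ,
-- so the third branch is unreachable there.
def aLoop (univ : List Int) (preds : List (Int × List Int))
    (seen : List Int) (q : List Int) : List Int :=
  match q with
  | [] => seen
  | bid :: rest =>
    if bid ∈ seen then aLoop univ preds seen rest
    else if bid ∈ univ then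
      aLoop univ preds (seen ++ [bid])
        (rest ++ (pvGet preds bid).filter (fun p => ¬ (p ∈ seen ++ [bid])))
    else aLoop univ preds seen rest
termination_by (univ.toFinset \ seen.toFinset).card * (pvPSum preds + 2) + q.length
decreasing_by
  · simp only [List.length_cons]; omega
  · rename_i h1 h2
    have hcard : (univ.toFinset \ (seen ++ [bid]).toFinset).card + 1
        ≤ (univ.toFinset \ seen.toFinset).card := by
      have hss : univ.toFinset \ (seen ++ [bid]).toFinset ⊂ univ.toFinset \ seen.toFinset := by
        constructor
        · intro x hx
          simp only [Finset.mem_sdiff, List.toFinset_append, Finset.mem_union,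
            List.mem_toFinset, List.toFinset_cons, Finset.mem_insert] at hx ⊢
          tauto
        · intro hsub
          have hb : bid ∈ univ.toFinset \ seen.toFinset := by
            simp [Finset.mem_sdiff, List.mem_toFinset, h1, h2]
          exact (Finset.mem_sdiff.mp (hsub hb)).2 (by simp)
      exact Finset.card_lt_card hss
    have hf : ((pvGet preds bid).filter (fun p => ¬ (p ∈ seen ++ [bid]))).length
        ≤ pvPSum preds := le_trans (List.length_filter_le _ _) (pvGet_len_le preds bid)
    have hmul : ((univ.toFinset \ (seen ++ [bid]).toFinset).card + 1) * (pvPSum preds + 2)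
        ≤ (univ.toFinset \ seen.toFinset).card * (pvPSum preds + 2) :=
      Nat.mul_le_mul_right _ hcard
    rw [Nat.succ_mul] at hmul
    simp only [List.length_append, List.length_cons] at *
    omega
  · simp only [List.length_cons]; omega

def reachable_backward_py (starts : List Int) (preds : List (Int × List Int)) : List Int :=
  aLoop (pvUniv starts preds) preds [] starts

-- ===== PORT B =====
-- filtered predecessor fetch; the '(· ∈ univ)' filter is a termination guard only —
-- it keeps nothing out when called from the real entry point, where all ids are in univ
def pvGetF (univ : List Int) (preds : List (Int × List Int)) (bid : Int) : List Int :=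
  (pvGet preds bid).filter (fun p => p ∈ univ)

-- 'if p not in seen: seen[p] = None' with the seen-list threaded through foldl
def pvAdd (s : List Int) (p : Int) : List Int := if p ∈ s then s else s ++ [p]
def pvAddAll (s : List Int) (l : List Int) : List Int := l.foldl pvAdd s

-- inner 'for p in preds.get(bid, [])' of Source B's sweep, carrying the changed flag
def bInner (st : List Int × Bool) (l : List Int) : List Int × Bool :=
  l.foldl (fun st p => if p ∈ st.1 then st else (st.1 ++ [p], true)) st

-- one full sweep 'for bid in list(seen)' of Source B
def bSweep (univ : List Int) (preds : List (Int × List Int))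
    (snapshot : List Int) (st : List Int × Bool) : List Int × Bool :=
  snapshot.foldl (fun st bid => bInner st (pvGetF univ preds bid)) st

-- flagless form of a sweep, used by the termination lemmas bFix cites
def pvFoldF (univ : List Int) (preds : List (Int × List Int))
    (s : List Int) (snap : List Int) : List Int :=
  snap.foldl (fun s bid => pvAddAll s (pvGetF univ preds bid)) s

theorem pvAddAll_prefix (l : List Int) (s : List Int) : s <+: pvAddAll s l := by
  induction l generalizing s with
  | nil => simp [pvAddAll]
  | cons p l ih =>
    have h1 : s <+: pvAdd s p := by
      unfold pvAdd; split
      · exact List.prefix_refl s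
      · exact List.prefix_append s [p]
    exact h1.trans (ih (pvAdd s p))

theorem pvAddAll_split (l : List Int) (s : List Int) :
    pvAddAll s l = s ++ (pvAddAll s l).drop s.length := by
  obtain ⟨u, hu⟩ := pvAddAll_prefix l s
  rw [← hu, List.drop_left]

theorem pvNew_props (l : List Int) (s : List Int) :
    ((pvAddAll s l).drop s.length).Nodup ∧
      ∀ x ∈ (pvAddAll s l).drop s.length, x ∈ l ∧ ¬ x ∈ s := by
  induction l generalizing s with
  | nil => simp [pvAddAll, List.drop_length]
  | cons p l ih =>
    by_cases hp : p ∈ s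
    · have h0 : pvAddAll s (p :: l) = pvAddAll s l := by
        simp [pvAddAll, pvAdd, hp]
      rw [h0]
      obtain ⟨h1, h2⟩ := ih s
      exact ⟨h1, fun x hx => ⟨List.mem_cons_of_mem p (h2 x hx).1, (h2 x hx).2⟩⟩
    · have h0 : pvAddAll s (p :: l) = pvAddAll (s ++ [p]) l := by
        simp [pvAddAll, pvAdd, hp]
      obtain ⟨h1, h2⟩ := ih (s ++ [p])
      have hsplit := pvAddAll_split l (s ++ [p])
      have hd : (pvAddAll s (p :: l)).drop s.length
          = p :: (pvAddAll (s ++ [p]) l).drop (s ++ [p]).length := by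
        rw [h0, hsplit]
        rw [List.append_assoc, List.drop_left]
        simp
      rw [hd]
      constructor
      · exact List.nodup_cons.mpr ⟨fun hc => ((h2 p hc).2 (by simp)), h1⟩
      · intro x hx
        rcases List.mem_cons.mp hx with hx | hx
        · subst hx; exact ⟨List.mem_cons_self, hp⟩
        · have := h2 x hx
          simp only [List.mem_append, List.mem_singleton] at this
          exact ⟨List.mem_cons_of_mem p this.1, fun hc => this.2 (Or.inl hc)⟩

theorem pvAddAll_cons_mem (s l : List Int) (p : Int) (hp : p ∈ s) :
    pvAddAll s (p :: l) = pvAddAll s l := by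
  simp [pvAddAll, pvAdd, hp]

theorem pvAddAll_cons_not_mem (s l : List Int) (p : Int) (hp : ¬ p ∈ s) :
    pvAddAll s (p :: l) = pvAddAll (s ++ [p]) l := by
  simp [pvAddAll, pvAdd, hp]

theorem bInner_eq (l : List Int) (s : List Int) (ch : Bool) :
    bInner (s, ch) l = (pvAddAll s l, ch || decide (pvAddAll s l ≠ s)) := by
  induction l generalizing s ch with
  | nil => simp [bInner, pvAddAll]
  | cons p l ih =>
    by_cases hp : p ∈ s
    · have h1 : bInner (s, ch) (p :: l) = bInner (s, ch) l := by simp [bInner, hp]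
      rw [h1, ih, pvAddAll_cons_mem s l p hp]
    · have h1 : bInner (s, ch) (p :: l) = bInner (s ++ [p], true) l := by simp [bInner, hp]
      rw [h1, ih, pvAddAll_cons_not_mem s l p hp]
      have hlen := (pvAddAll_prefix l (s ++ [p])).length_le
      have hne : pvAddAll (s ++ [p]) l ≠ s := by
        intro h
        rw [h] at hlen
        simp at hlen
      simp [hne]

theorem pvFoldF_prefix (univ : List Int) (preds : List (Int × List Int))
    (snap : List Int) : ∀ s : List Int, s <+: pvFoldF univ preds s snap := by
  induction snap with
  | nil => intro s; simp [pvFoldF]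
  | cons bid rest ih =>
    intro s
    exact (pvAddAll_prefix (pvGetF univ preds bid) s).trans
      (ih (pvAddAll s (pvGetF univ preds bid)))

theorem dropSplit {s m t : List Int} (h1 : s <+: m) (h2 : m <+: t) :
    t.drop s.length = m.drop s.length ++ t.drop m.length := by
  obtain ⟨a, rfl⟩ := h1
  obtain ⟨b, rfl⟩ := h2
  have e1 : ((s ++ a) ++ b).drop s.length = a ++ b := by
    rw [List.append_assoc, List.drop_left]
  have e2 : (s ++ a).drop s.length = a := List.drop_left
  have e3 : ((s ++ a) ++ b).drop (s ++ a).length = b := List.drop_left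
  rw [e1, e2, e3]

theorem prefix_append_drop {s t : List Int} (h : s <+: t) :
    t = s ++ t.drop s.length := by
  obtain ⟨u, rfl⟩ := h
  rw [List.drop_left]

theorem bSweep_eq (univ : List Int) (preds : List (Int × List Int))
    (snap : List Int) : ∀ (s : List Int) (ch : Bool),
    bSweep univ preds snap (s, ch)
      = (pvFoldF univ preds s snap, ch || decide (pvFoldF univ preds s snap ≠ s)) := by
  induction snap with
  | nil => intro s ch; simp [bSweep, pvFoldF]
  | cons bid rest ih =>
    intro s ch
    have h0 : bSweep univ preds (bid :: rest) (s, ch)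
        = bSweep univ preds rest (bInner (s, ch) (pvGetF univ preds bid)) := rfl
    rw [h0, bInner_eq, ih]
    have hfe : pvFoldF univ preds s (bid :: rest)
        = pvFoldF univ preds (pvAddAll s (pvGetF univ preds bid)) rest := rfl
    rw [hfe]
    have hps : s <+: pvAddAll s (pvGetF univ preds bid) :=
      pvAddAll_prefix (pvGetF univ preds bid) s
    have hst : pvAddAll s (pvGetF univ preds bid)
        <+: pvFoldF univ preds (pvAddAll s (pvGetF univ preds bid)) rest :=
      pvFoldF_prefix univ preds rest _
    by_cases h1 : pvAddAll s (pvGetF univ preds bid) = s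
    · rw [h1]
      simp
    · have hTs : pvFoldF univ preds (pvAddAll s (pvGetF univ preds bid)) rest ≠ s := by
        intro h
        have hl1 := hps.length_le
        have hl2 := hst.length_le
        rw [h] at hl2
        exact h1 ((hps.eq_of_length (by omega)).symm)
      simp [h1, hTs]

theorem pvFoldF_new (univ : List Int) (preds : List (Int × List Int)) :
    ∀ (snap s : List Int), ∀ x ∈ (pvFoldF univ preds s snap).drop s.length,
      x ∈ univ ∧ ¬ x ∈ s := by
  intro snap
  induction snap with
  | nil => intro s x hx; simp [pvFoldF, List.drop_length] at hx
  | cons bid rest ih =>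
    intro s x hx
    have hps : s <+: pvAddAll s (pvGetF univ preds bid) :=
      pvAddAll_prefix (pvGetF univ preds bid) s
    have hst : pvAddAll s (pvGetF univ preds bid)
        <+: pvFoldF univ preds (pvAddAll s (pvGetF univ preds bid)) rest :=
      pvFoldF_prefix univ preds rest _
    have hfe : pvFoldF univ preds s (bid :: rest)
        = pvFoldF univ preds (pvAddAll s (pvGetF univ preds bid)) rest := rfl
    rw [hfe, dropSplit hps hst] at hx
    rcases List.mem_append.mp hx with hx | hx
    · have := (pvNew_props (pvGetF univ preds bid) s).2 x hx
      refine ⟨?_, this.2⟩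
      have hm := this.1
      simp only [pvGetF, List.mem_filter] at hm
      simpa using hm.2
    · have := ih (pvAddAll s (pvGetF univ preds bid)) x hx
      exact ⟨this.1, fun hc => this.2 (hps.subset hc)⟩

theorem fixDec (univ : List Int) (preds : List (Int × List Int))
    (snap s : List Int) (h : pvFoldF univ preds s snap ≠ s) :
    (univ.toFinset \ (pvFoldF univ preds s snap).toFinset).card
      < (univ.toFinset \ s.toFinset).card := by
  have hp : s <+: pvFoldF univ preds s snap := pvFoldF_prefix univ preds snap s
  have hT := prefix_append_drop hp
  cases hfe : (pvFoldF univ preds s snap).drop s.length with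
  | nil =>
    exact absurd (by rw [hT, hfe, List.append_nil]) h
  | cons x0 f0 =>
    have hx0d : x0 ∈ (pvFoldF univ preds s snap).drop s.length := by
      rw [hfe]; exact List.mem_cons_self
    have hx0 := pvFoldF_new univ preds snap s x0 hx0d
    have hx0t : x0 ∈ pvFoldF univ preds s snap := List.mem_of_mem_drop hx0d
    have hsub : univ.toFinset \ (pvFoldF univ preds s snap).toFinset
        ⊆ univ.toFinset \ s.toFinset := by
      intro y hy
      rw [Finset.mem_sdiff] at hy ⊢
      refine ⟨hy.1, fun hc => hy.2 ?_⟩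
      rw [List.mem_toFinset] at hc ⊢
      exact hp.subset hc
    refine Finset.card_lt_card ⟨hsub, fun hc => ?_⟩
    have hx0u : x0 ∈ univ.toFinset \ s.toFinset := by
      rw [Finset.mem_sdiff, List.mem_toFinset, List.mem_toFinset]
      exact ⟨hx0.1, hx0.2⟩
    have := hc hx0u
    rw [Finset.mem_sdiff, List.mem_toFinset, List.mem_toFinset] at this
    exact this.2 hx0t

-- literal port of Source B's 'while changed' saturation loop: sweep the whole current
-- seen list; recurse while a sweep added something
def bFix (univ : List Int) (preds : List (Int × List Int)) (seen : List Int) : List Int :=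
  if (bSweep univ preds seen (seen, false)).2
  then bFix univ preds (bSweep univ preds seen (seen, false)).1
  else seen
termination_by (univ.toFinset \ seen.toFinset).card
decreasing_by
  rename_i h
  simp only [bSweep_eq, Bool.false_or, decide_eq_true_eq] at h ⊢
  exact fixDec univ preds seen seen h

def reachable_backward_py_alt (starts : List Int) (preds : List (Int × List Int)) : List Int :=
  bFix (pvUniv starts preds) preds (PySem.List.dedup starts)

-- ===== PRECONDITION & SPEC =====
-- Pre_ only states the type convention: 'starts' encodes a Python set, so its List
-- encoding holds distinct elements; no actual Python input is excluded.
def Pre_reachable_backward_py (starts : List Int) (preds : List (Int × List Int)) : Prop :=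
  starts.Nodup
instance (starts : List Int) (preds : List (Int × List Int)) :
    Decidable (Pre_reachable_backward_py starts preds) := by
  unfold Pre_reachable_backward_py; infer_instance

def pvWitness_reachable_backward_py : List Int × (List (Int × List Int)) :=
  ([1, 2], [(2, [3, 1]), (3, [])])

def Spec_reachable_backward_py (starts : List Int) (preds : List (Int × List Int)) (out : List Int) : Prop := out = reachable_backward_py_alt starts preds
instance (starts : List Int) (preds : List (Int × List Int)) (out : List Int) : Decidable (Spec_reachable_backward_py starts preds out) := by unfold Spec_reachable_backward_py; infer_instance

-- ===== CLAIM (what is proved, stated in full; the proofs are below) =====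
def Claim_equal_reachable_backward_py : Prop := ∀ (starts : List Int) (preds : List (Int × List Int)), Dom_reachable_backward_py starts preds → Pre_reachable_backward_py starts preds → Spec_reachable_backward_py starts preds (reachable_backward_py starts preds)

-- ===== LEMMAS AND PROOFS =====

theorem pvGet_sub (preds : List (Int × List Int)) (k : Int) :
    ∀ p ∈ pvGet preds k, ∃ kv ∈ preds, p ∈ kv.2 := by
  intro p hp
  unfold pvGet at hp
  cases hf : preds.find? (fun kv => kv.1 == k) with
  | none => rw [hf] at hp; simp at hp
  | some kv =>
    rw [hf] at hp
    exact ⟨kv, List.mem_of_find?_eq_some hf, hp⟩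

theorem pvAddAll_append (s l₁ l₂ : List Int) :
    pvAddAll s (l₁ ++ l₂) = pvAddAll (pvAddAll s l₁) l₂ :=
  List.foldl_append

theorem pvAddAll_filter_not_mem (l : List Int) (s t : List Int) (h : ∀ x ∈ t, x ∈ s) :
    pvAddAll s (l.filter (fun p => ¬ p ∈ t)) = pvAddAll s l := by
  induction l generalizing s with
  | nil => rfl
  | cons p l ih =>
    by_cases hp : p ∈ t
    · rw [show (p :: l).filter (fun p => ¬ p ∈ t) = l.filter (fun p => ¬ p ∈ t) by
        simp [hp]]
      rw [ih s h, pvAddAll_cons_mem s l p (h p hp)]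
    · rw [show (p :: l).filter (fun p => ¬ p ∈ t)
          = p :: l.filter (fun p => ¬ p ∈ t) by simp [hp]]
      by_cases hps : p ∈ s
      · rw [pvAddAll_cons_mem _ _ _ hps, pvAddAll_cons_mem _ _ _ hps, ih s h]
      · rw [pvAddAll_cons_not_mem _ _ _ hps, pvAddAll_cons_not_mem _ _ _ hps]
        exact ih (s ++ [p]) (fun x hx => List.mem_append_left [p] (h x hx))

theorem pvAddAll_drop_cons (s l : List Int) (p : Int) (hp : ¬ p ∈ s) :
    (pvAddAll s (p :: l)).drop s.length
      = p :: (pvAddAll (s ++ [p]) l).drop (s.length + 1) := by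
  rw [pvAddAll_cons_not_mem s l p hp]
  conv_lhs => rw [pvAddAll_split l (s ++ [p])]
  rw [List.append_assoc, List.drop_left]
  simp

theorem pvAddAll_subset_id (l s : List Int) (h : ∀ x ∈ l, x ∈ s) :
    pvAddAll s l = s := by
  induction l with
  | nil => rfl
  | cons p l ih =>
    rw [pvAddAll_cons_mem s l p (h p List.mem_cons_self)]
    exact ih (fun x hx => h x (List.mem_cons_of_mem p hx))

theorem pvFoldF_closed (univ : List Int) (preds : List (Int × List Int))
    (P s : List Int) (h : ∀ p ∈ P, ∀ x ∈ pvGetF univ preds p, x ∈ s) :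
    pvFoldF univ preds s P = s := by
  induction P with
  | nil => rfl
  | cons p P ih =>
    have h0 : pvFoldF univ preds s (p :: P)
        = pvFoldF univ preds (pvAddAll s (pvGetF univ preds p)) P := rfl
    rw [h0, pvAddAll_subset_id _ _ (h p List.mem_cons_self)]
    exact ih (fun q hq => h q (List.mem_cons_of_mem p hq))

theorem pvFoldF_append (univ : List Int) (preds : List (Int × List Int))
    (s l₁ l₂ : List Int) :
    pvFoldF univ preds s (l₁ ++ l₂) = pvFoldF univ preds (pvFoldF univ preds s l₁) l₂ :=
  List.foldl_append

theorem pvAddAll_mem_right (l : List Int) : ∀ (s : List Int) (x : Int), x ∈ l →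
    x ∈ pvAddAll s l := by
  induction l with
  | nil => intro s x hx; simp at hx
  | cons p l ih =>
    intro s x hx
    have h0 : pvAddAll s (p :: l) = pvAddAll (pvAdd s p) l := rfl
    rcases List.mem_cons.mp hx with hx | hx
    · subst hx
      have hp : x ∈ pvAdd s x := by
        unfold pvAdd; split
        · assumption
        · simp
      rw [h0]
      exact (pvAddAll_prefix l (pvAdd s x)).subset hp
    · rw [h0]; exact ih (pvAdd s p) x hx

theorem pvFoldF_mem_get (univ : List Int) (preds : List (Int × List Int)) :
    ∀ (R s : List Int) (p : Int), p ∈ R → ∀ x ∈ pvGetF univ preds p,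
      x ∈ pvFoldF univ preds s R := by
  intro R
  induction R with
  | nil => intro s p hp; simp at hp
  | cons bid rest ih =>
    intro s p hp x hx
    have h0 : pvFoldF univ preds s (bid :: rest)
        = pvFoldF univ preds (pvAddAll s (pvGetF univ preds bid)) rest := rfl
    rcases List.mem_cons.mp hp with hp | hp
    · subst hp
      rw [h0]
      exact (pvFoldF_prefix univ preds rest _).subset
        (pvAddAll_mem_right (pvGetF univ preds p) s x hx)
    · rw [h0]; exact ih _ p hp x hx

-- lemma cLoop's decreasing_by cites
theorem bLoop_dec (univ seen rest ps : List Int) (hps : ∀ x ∈ ps, x ∈ univ) :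
    (univ.toFinset \ (pvAddAll seen ps).toFinset).card * (univ.toFinset.card + 2)
        + (rest ++ (pvAddAll seen ps).drop seen.length).length
      < (univ.toFinset \ seen.toFinset).card * (univ.toFinset.card + 2)
        + (rest.length + 1) := by
  set t := pvAddAll seen ps with ht
  set f := t.drop seen.length with hf
  have hsplit : t = seen ++ f := pvAddAll_split ps seen
  obtain ⟨hnd, hmem⟩ := pvNew_props ps seen
  rw [← hf] at hnd hmem
  cases hfe : f with
  | nil =>
    have : t = seen := by rw [hsplit, hfe, List.append_nil]
    rw [this]
    simp
  | cons x0 f0 =>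
    have hx0 : x0 ∈ f := by rw [hfe]; exact List.mem_cons_self
    have hsub : univ.toFinset \ t.toFinset ⊆ univ.toFinset \ seen.toFinset := by
      intro y hy
      rw [Finset.mem_sdiff] at hy ⊢
      refine ⟨hy.1, fun hc => hy.2 ?_⟩
      rw [List.mem_toFinset] at hc ⊢
      rw [hsplit]; exact List.mem_append_left f hc
    have hcard : (univ.toFinset \ t.toFinset).card + 1
        ≤ (univ.toFinset \ seen.toFinset).card := by
      refine Finset.card_lt_card ⟨hsub, fun hc => ?_⟩
      have hx0u : x0 ∈ univ.toFinset \ seen.toFinset := by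
        rw [Finset.mem_sdiff, List.mem_toFinset, List.mem_toFinset]
        exact ⟨hps x0 (hmem x0 hx0).1, (hmem x0 hx0).2⟩
      have := hc hx0u
      rw [Finset.mem_sdiff, List.mem_toFinset, List.mem_toFinset] at this
      exact this.2 (by rw [hsplit]; exact List.mem_append_right seen hx0)
    have hlen : f.length ≤ univ.toFinset.card := by
      have h1 : f.toFinset.card = f.length := List.toFinset_card_of_nodup hnd
      have h2 : f.toFinset ⊆ univ.toFinset := by
        intro y hy
        rw [List.mem_toFinset] at hy ⊢
        exact hps y (hmem y hy).1
      calc f.length = f.toFinset.card := h1.symm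
        _ ≤ univ.toFinset.card := Finset.card_le_card h2
    have hmul : ((univ.toFinset \ t.toFinset).card + 1) * (univ.toFinset.card + 2)
        ≤ (univ.toFinset \ seen.toFinset).card * (univ.toFinset.card + 2) :=
      Nat.mul_le_mul_right _ hcard
    rw [Nat.succ_mul] at hmul
    rw [hfe] at hlen
    simp only [List.length_append]
    omega

-- proof-side cursor loop: the common refinement of A's BFS and B's saturation
def cLoop (univ : List Int) (preds : List (Int × List Int))
    (seen : List Int) (pending : List Int) : List Int :=
  match pending with
  | [] => seen
  | bid :: rest =>
    cLoop univ preds (pvAddAll seen (pvGetF univ preds bid))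
      (rest ++ (pvAddAll seen (pvGetF univ preds bid)).drop seen.length)
termination_by (univ.toFinset \ seen.toFinset).card * (univ.toFinset.card + 2) + pending.length
decreasing_by
  simp only [List.length_cons]
  exact bLoop_dec univ seen rest _
    (fun x hx => by simp only [pvGetF, List.mem_filter] at hx; simpa using hx.2)

theorem cBatch (univ : List Int) (preds : List (Int × List Int)) :
    ∀ (R Q seen : List Int),
      cLoop univ preds seen (R ++ Q)
        = cLoop univ preds (pvFoldF univ preds seen R)
            (Q ++ (pvFoldF univ preds seen R).drop seen.length) := by
  intro R
  induction R with
  | nil =>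
    intro Q seen
    simp [pvFoldF, List.drop_length]
  | cons bid rest ih =>
    intro Q seen
    have h1 : cLoop univ preds seen ((bid :: rest) ++ Q)
        = cLoop univ preds (pvAddAll seen (pvGetF univ preds bid))
            ((rest ++ Q) ++ (pvAddAll seen (pvGetF univ preds bid)).drop seen.length) := by
      rw [List.cons_append, cLoop]
    rw [h1, List.append_assoc, ih (Q ++ (pvAddAll seen (pvGetF univ preds bid)).drop seen.length)]
    rw [List.append_assoc,
      ← dropSplit (pvAddAll_prefix (pvGetF univ preds bid) seen)
        (pvFoldF_prefix univ preds rest (pvAddAll seen (pvGetF univ preds bid)))]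
    rfl

theorem cLoop_eq_bFix (univ : List Int) (preds : List (Int × List Int)) :
    ∀ seen : List Int, ∀ P R : List Int, seen = P ++ R →
      (∀ p ∈ P, ∀ x ∈ pvGetF univ preds p, x ∈ seen) →
      cLoop univ preds seen R = bFix univ preds seen := by
  intro seen
  induction seen using bFix.induct univ preds with
  | case1 seen hst ih =>
    intro P R hPR hcl
    subst hPR
    have hfst : (bSweep univ preds (P ++ R) ((P ++ R), false)).1
        = pvFoldF univ preds (P ++ R) (P ++ R) := by rw [bSweep_eq]
    have hTfull : pvFoldF univ preds (P ++ R) (P ++ R)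
        = pvFoldF univ preds (P ++ R) R := by
      rw [pvFoldF_append, pvFoldF_closed univ preds P (P ++ R) hcl]
    have hb1 : (bSweep univ preds (P ++ R) ((P ++ R), false)).1
        = pvFoldF univ preds (P ++ R) R := by rw [hfst, hTfull]
    have hpre : (P ++ R) <+: pvFoldF univ preds (P ++ R) R :=
      pvFoldF_prefix univ preds R (P ++ R)
    have hbatch := cBatch univ preds R [] (P ++ R)
    rw [List.append_nil, List.nil_append] at hbatch
    have hclosed : ∀ p ∈ P ++ R, ∀ x ∈ pvGetF univ preds p,
        x ∈ (bSweep univ preds (P ++ R) ((P ++ R), false)).1 := by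
      intro p hp x hx
      rw [hb1]
      rcases List.mem_append.mp hp with hp | hp
      · exact hpre.subset (hcl p hp x hx)
      · exact pvFoldF_mem_get univ preds R (P ++ R) p hp x hx
    have hih := ih (P ++ R)
      ((pvFoldF univ preds (P ++ R) R).drop (P ++ R).length)
      (by rw [hb1]; exact prefix_append_drop hpre) hclosed
    rw [hb1] at hih
    rw [hbatch, hih]
    conv_rhs => rw [bFix]
    rw [if_pos hst, hb1]
  | case2 seen hst =>
    intro P R hPR hcl
    subst hPR
    have hfixp : pvFoldF univ preds (P ++ R) (P ++ R) = P ++ R := by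
      by_contra hne
      apply hst
      rw [bSweep_eq]
      simp [hne]
    have hR : pvFoldF univ preds (P ++ R) R = P ++ R := by
      rw [pvFoldF_append, pvFoldF_closed univ preds P (P ++ R) hcl] at hfixp
      exact hfixp
    have hbatch := cBatch univ preds R [] (P ++ R)
    rw [List.append_nil, List.nil_append, hR, List.drop_length] at hbatch
    rw [hbatch, cLoop, bFix, if_neg hst]

theorem pv_bridge (univ : List Int) (preds : List (Int × List Int))
    (Hp : ∀ kv ∈ preds, ∀ p ∈ kv.2, p ∈ univ) :
    ∀ seen q, (∀ x ∈ q, x ∈ univ) →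
      aLoop univ preds seen q
        = cLoop univ preds (pvAddAll seen q) ((pvAddAll seen q).drop seen.length) := by
  intro seen q
  induction seen, q using aLoop.induct univ preds with
  | case1 seen =>
    intro _
    rw [show pvAddAll seen [] = seen from rfl, List.drop_length, aLoop, cLoop]
  | case2 seen bid rest hbs ih =>
    intro Hq
    rw [aLoop, if_pos hbs, ih (fun x hx => Hq x (List.mem_cons_of_mem bid hx)),
      pvAddAll_cons_mem seen rest bid hbs]
  | case3 seen bid rest hbs hbu ih =>
    intro Hq
    have hps : ∀ p ∈ pvGet preds bid, p ∈ univ := by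
      intro p hp
      obtain ⟨kv, hkv, hpkv⟩ := pvGet_sub preds bid p hp
      exact Hp kv hkv p hpkv
    have Hq' : ∀ x ∈ rest ++ (pvGet preds bid).filter (fun p => ¬ (p ∈ seen ++ [bid])),
        x ∈ univ := by
      intro x hx
      rcases List.mem_append.mp hx with hx | hx
      · exact Hq x (List.mem_cons_of_mem bid hx)
      · exact hps x (List.mem_filter.mp hx).1
    rw [aLoop, if_neg hbs, if_pos hbu, ih Hq']
    rw [pvAddAll_drop_cons seen rest bid hbs, pvAddAll_cons_not_mem seen rest bid hbs]
    rw [cLoop]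
    have hfilt : pvGetF univ preds bid = pvGet preds bid := by
      simp only [pvGetF]
      exact List.filter_eq_self.mpr (fun p hp => by simpa using hps p hp)
    rw [hfilt]
    have hsub1 : seen ++ [bid] <+: pvAddAll (seen ++ [bid]) rest := pvAddAll_prefix rest _
    have hT : pvAddAll (seen ++ [bid]) (rest ++ (pvGet preds bid).filter (fun p => ¬ (p ∈ seen ++ [bid])))
        = pvAddAll (pvAddAll (seen ++ [bid]) rest) (pvGet preds bid) := by
      rw [pvAddAll_append]
      exact pvAddAll_filter_not_mem _ _ _ (fun x hx => hsub1.mem hx)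
    rw [hT]
    congr 1
    rw [show seen.length + 1 = (seen ++ [bid]).length by simp]
    rw [dropSplit hsub1 (pvAddAll_prefix (pvGet preds bid) (pvAddAll (seen ++ [bid]) rest))]
  | case4 seen bid rest hbs hbu ih =>
    intro Hq
    exact absurd (Hq bid List.mem_cons_self) hbu

theorem pvAddAll_nodup_disjoint (l : List Int) : ∀ s : List Int,
    l.Nodup → (∀ x ∈ l, ¬ x ∈ s) → pvAddAll s l = s ++ l := by
  induction l with
  | nil => intro s _ _; simp [pvAddAll]
  | cons p l ih =>
    intro s hnd hdis
    rw [pvAddAll_cons_not_mem s l p (hdis p List.mem_cons_self)]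
    rw [ih (s ++ [p]) (List.nodup_cons.mp hnd).2 ?_]
    · simp
    · intro x hx
      simp only [List.mem_append, List.mem_singleton]
      rintro (h | h)
      · exact hdis x (List.mem_cons_of_mem p hx) h
      · exact (List.nodup_cons.mp hnd).1 (h ▸ hx)

-- ===== VERDICT (by name: the statement is the Claim_ definition above) =====
theorem reachable_backward_py_spec : Claim_equal_reachable_backward_py := by
  intro starts preds _ hpre
  unfold Spec_reachable_backward_py reachable_backward_py reachable_backward_py_alt
  have Hp : ∀ kv ∈ preds, ∀ p ∈ kv.2, p ∈ pvUniv starts preds := by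
    intro kv hkv p hp
    exact List.mem_append_right starts (List.mem_flatMap.mpr ⟨kv, hkv, hp⟩)
  have Hq : ∀ x ∈ starts, x ∈ pvUniv starts preds := fun x hx =>
    List.mem_append_left _ hx
  rw [pv_bridge (pvUniv starts preds) preds Hp [] starts Hq]
  rw [pvAddAll_nodup_disjoint starts [] hpre (by simp)]
  rw [show PySem.List.dedup starts = starts from by
    rw [PySem.List.dedup_eq_ofList]; exact PySem.Set.ofList_eq_self_of_nodup starts hpre]
  simp only [List.nil_append, List.length_nil, List.drop_zero]
  exact cLoop_eq_bFix (pvUniv starts preds) preds starts [] starts rfl (by simp)
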